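-- pv_equiv track=rewrite | github.com/JingyangDeng/my-leetcode | 2401-2500/2412/solution.py | minimumMoney
-- ===== SOURCE A (Python) =====
-- from typing import List
--
-- def minimumMoney(transactions: List[List[int]]) -> int:
--     balance = 0
--     max_back = 0
--     max_cost = 0
--     for t in transactions:
--         if t[0] > t[1]:
--             balance += t[0] - t[1]
--             max_back = max(max_back, t[1])
--         else:
--             max_cost = max(max_cost, t[0])
--     return balance + max(max_back, max_cost)
-- ===== SOURCE B (Python) =====
-- def minimumMoney(transactions):
--     total = sum(max(t[0] - t[1], 0) for t in transactions)
--     return max([total] + [total - max(t[0] - t[1], 0) + t[0] for t in transactions])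
-- ===== Notes on version B (the rewrite author's own statement) =====
-- stated objective: alternative
-- what changed: Instead of A's branch maintaining a running loss and two separate maxima of cashback and cost, B computes the total positive loss and then, for each transaction, the initial money required if that transaction is scheduled after all the other losing ones (total loss minus its own loss plus its full cost), returning the maximum of these requirements (floored at the total loss).
import Mathlib
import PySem

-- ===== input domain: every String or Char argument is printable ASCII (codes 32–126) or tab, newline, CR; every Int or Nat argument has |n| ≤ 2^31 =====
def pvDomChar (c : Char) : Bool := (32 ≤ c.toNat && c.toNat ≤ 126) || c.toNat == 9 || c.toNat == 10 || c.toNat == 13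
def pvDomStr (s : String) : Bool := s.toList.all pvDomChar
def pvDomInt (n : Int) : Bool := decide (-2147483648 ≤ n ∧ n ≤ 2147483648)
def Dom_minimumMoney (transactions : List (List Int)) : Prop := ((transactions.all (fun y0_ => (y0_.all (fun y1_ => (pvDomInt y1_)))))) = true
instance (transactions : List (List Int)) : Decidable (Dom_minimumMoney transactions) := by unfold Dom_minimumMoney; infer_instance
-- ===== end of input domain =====

-- ===== PORT A =====
-- B computes per-transaction worst-schedule requirements and takes their max; objective: alternative.
-- t[i] under Pre_ (every transaction has length ≥ 2); exact there, 0 only off-domain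
def pvGet (t : List Int) (i : Int) : Int := (PySem.List.pyGet? t i).getD 0

def minimumMoney (transactions : List (List Int)) : Int :=
  let r := transactions.foldl (fun (s : Int × Int × Int) t =>
    if pvGet t 0 > pvGet t 1 then (s.1 + (pvGet t 0 - pvGet t 1), max s.2.1 (pvGet t 1), s.2.2)
    else (s.1, s.2.1, max s.2.2 (pvGet t 0))) (0, 0, 0)
  r.1 + max r.2.1 r.2.2

-- ===== PORT B =====
def minimumMoney_alt (transactions : List (List Int)) : Int :=
  let total := (transactions.map (fun t => max (pvGet t 0 - pvGet t 1) 0)).sum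
  (transactions.map (fun t => total - max (pvGet t 0 - pvGet t 1) 0 + pvGet t 0)).foldl max total

-- ===== PRECONDITION & SPEC =====
-- Pre_ excludes exactly the inputs where A (and B) raise IndexError: a transaction with fewer than 2 entries.
def Pre_minimumMoney (transactions : List (List Int)) : Prop :=
  ∀ t ∈ transactions, 2 ≤ t.length
instance (transactions : List (List Int)) : Decidable (Pre_minimumMoney transactions) := by
  unfold Pre_minimumMoney; infer_instance
def pvWitness_minimumMoney : List (List Int) := [[3, 1], [2, 5]]
def Spec_minimumMoney (transactions : List (List Int)) (out : Int) : Prop := out = minimumMoney_alt transactions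
instance (transactions : List (List Int)) (out : Int) : Decidable (Spec_minimumMoney transactions out) := by unfold Spec_minimumMoney; infer_instance

-- ===== CLAIM (what is proved, stated in full; the proofs are below) =====
def Claim_equal_minimumMoney : Prop := ∀ (transactions : List (List Int)), Dom_minimumMoney transactions → Pre_minimumMoney transactions → Spec_minimumMoney transactions (minimumMoney transactions)

-- ===== LEMMAS AND PROOFS =====

-- A's fold, characterised: loss so far plus max over min(cost, cashback), floored by the accumulated maxima.
theorem minimumMoney_fold_eq (ts : List (List Int)) :
    ∀ (b mb mc : Int),
      (let r := ts.foldl (fun (s : Int × Int × Int) t =>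
        if pvGet t 0 > pvGet t 1 then (s.1 + (pvGet t 0 - pvGet t 1), max s.2.1 (pvGet t 1), s.2.2)
        else (s.1, s.2.1, max s.2.2 (pvGet t 0))) (b, mb, mc)
       r.1 + max r.2.1 r.2.2)
      = b + (ts.map (fun t => max (pvGet t 0 - pvGet t 1) 0)).sum
          + ((ts.map (fun t => min (pvGet t 0) (pvGet t 1))).foldl max (max mb mc)) := by
  induction ts with
  | nil => intro b mb mc; simp
  | cons t ts ih =>
    intro b mb mc
    by_cases h : pvGet t 0 > pvGet t 1
    · simp only [List.foldl_cons, List.map_cons, h, if_true, List.sum_cons, ih]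
      have h1 : max (max mb (pvGet t 1)) mc = max (max mb mc) (min (pvGet t 0) (pvGet t 1)) := by
        omega
      have h2 : max (pvGet t 0 - pvGet t 1) 0 = pvGet t 0 - pvGet t 1 := by omega
      rw [h1, h2]; ring_nf
    · simp only [List.foldl_cons, List.map_cons, h, if_false, List.sum_cons, ih]
      have h1 : max mb (max mc (pvGet t 0)) = max (max mb mc) (min (pvGet t 0) (pvGet t 1)) := by
        omega
      have h2 : max (pvGet t 0 - pvGet t 1) 0 = 0 := by omega
      rw [h1, h2]; ring_nf

-- max-fold commutes with adding a constant to every element and to the seed.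
theorem foldl_max_shift (c : Int) (xs : List Int) :
    ∀ (a : Int), (xs.map (fun x => c + x)).foldl max (c + a) = c + xs.foldl max a := by
  induction xs with
  | nil => intro a; simp
  | cons x xs ih =>
    intro a
    simp only [List.map_cons, List.foldl_cons]
    rw [show max (c + a) (c + x) = c + max a x by omega, ih]

-- shift lemma specialised to seed c.
theorem foldl_max_shift' (c : Int) (xs : List Int) :
    (xs.map (fun x => c + x)).foldl max c = c + xs.foldl max 0 := by
  have := foldl_max_shift c xs 0
  simpa using this

-- ===== VERDICT (by name: the statement is the Claim_ definition above) =====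
theorem minimumMoney_spec : Claim_equal_minimumMoney := by
  intro ts _ _
  unfold Spec_minimumMoney minimumMoney minimumMoney_alt
  have hA := minimumMoney_fold_eq ts 0 0 0
  simp only at hA ⊢
  rw [hA]
  set S := (ts.map (fun t => max (pvGet t 0 - pvGet t 1) 0)).sum with hS
  have hfun : (fun t => S - max (pvGet t 0 - pvGet t 1) 0 + pvGet t 0)
      = (fun x => S + x) ∘ (fun t : List Int => min (pvGet t 0) (pvGet t 1)) := by
    funext t
    simp only [Function.comp_apply]
    omega
  rw [hfun, ← List.map_map, foldl_max_shift']
  simp only [max_self]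
  omega
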